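-- pv_equiv track=rewrite | github.com/danyssilva/Declare_SBMN | Declare_SBMN/confirmation_functions.py | finding_self_loops_in_traces
-- ===== SOURCE A (Python) =====
-- def finding_self_loops_in_traces(matrix, traces):
--     # To be implemented: Find self-loops by analyzing the event log traces
--     for act in matrix.keys():
--         if act not in ['BEGIN', 'END']:
--             for trace in traces:
--                 act_counter = trace.count(act)
--                 if act_counter > 1:
--                     for i in range(0, len(trace) - 1):
--                         if trace[i] == act and trace[i + 1] == act:
--                             # Self-loop detected
--                             matrix[act][act] = 'JMP'
--     return matrix
-- ===== SOURCE B (Python) =====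
-- def finding_self_loops_in_traces(matrix, traces):
--     # One pass over the traces to collect activities with an adjacent repeat,
--     # then one pass over the matrix to mark them.
--     selfloopers = set()
--     for trace in traces:
--         for a, b in zip(trace, trace[1:]):
--             if a == b:
--                 selfloopers.add(a)
--     for act, row in matrix.items():
--         if act in selfloopers and act not in ('BEGIN', 'END'):
--             row[act] = 'JMP'
--     return matrix
-- ===== Notes on version B (the rewrite author's own statement) =====
-- stated objective: faster
-- what changed: Instead of rescanning every trace (count plus an index loop) once per matrix key, B sweeps the traces once collecting the set of activities with an adjacent repeat, then marks matrix rows in a single pass; Pre_ only excludes association lists with duplicate keys, which cannot arise from a Python dict.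
import Mathlib
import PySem

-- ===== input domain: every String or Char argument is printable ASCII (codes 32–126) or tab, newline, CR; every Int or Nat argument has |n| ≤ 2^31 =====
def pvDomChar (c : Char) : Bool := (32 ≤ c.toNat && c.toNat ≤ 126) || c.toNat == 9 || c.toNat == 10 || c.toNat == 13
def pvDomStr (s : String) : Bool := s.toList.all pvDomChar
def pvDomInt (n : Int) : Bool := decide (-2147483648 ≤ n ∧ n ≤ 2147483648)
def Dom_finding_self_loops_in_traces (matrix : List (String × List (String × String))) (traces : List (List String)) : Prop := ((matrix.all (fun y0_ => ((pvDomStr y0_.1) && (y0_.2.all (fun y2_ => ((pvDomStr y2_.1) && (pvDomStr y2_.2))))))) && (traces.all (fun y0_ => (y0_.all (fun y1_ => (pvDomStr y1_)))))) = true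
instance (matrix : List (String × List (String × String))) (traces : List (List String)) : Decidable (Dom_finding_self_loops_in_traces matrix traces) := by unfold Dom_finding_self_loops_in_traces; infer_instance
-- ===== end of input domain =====

-- B replaces A's per-key rescans of all traces by one sweep over the traces collecting the
-- self-looping activities, then one marking pass over the matrix; A mutates its dict argument
-- in place (B performs the same mutation in Python) — the equivalence proved is about the return value.


-- ===== PORT A =====
-- dict assignment row[k] = v on an association list: overwrite the first entry with key k in place, else append
def pvDictSet (row : List (String × String)) (k v : String) : List (String × String) :=
  match row with
  | [] => [(k, v)]
  | p :: rest => if p.1 = k then (k, v) :: rest else p :: pvDictSet rest k v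

-- dict mutation matrix[k] := g (matrix[k]) on an association list (first entry with key k; no-op if absent)
def pvDictModify (m : List (String × List (String × String))) (k : String)
    (g : List (String × String) → List (String × String)) : List (String × List (String × String)) :=
  match m with
  | [] => []
  | p :: rest => if p.1 = k then (p.1, g p.2) :: rest else p :: pvDictModify rest k g

def finding_self_loops_in_traces (matrix : List (String × List (String × String))) (traces : List (List String)) : List (String × List (String × String)) :=
  (matrix.map Prod.fst).foldl (fun m act =>
    if ¬ (act ∈ ["BEGIN", "END"]) then
      traces.foldl (fun m trace =>
        let act_counter := PySem.List.count trace act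
        if act_counter > 1 then
          (PySem.List.pyRange 0 ((trace.length : Int) - 1) 1).foldl (fun m i =>
            if PySem.List.pyGetD trace i "" = act ∧ PySem.List.pyGetD trace (i + 1) "" = act then
              pvDictModify m act (fun row => pvDictSet row act "JMP")
            else m) m
        else m) m
    else m) matrix

-- ===== PORT B =====
def finding_self_loops_in_traces_alt (matrix : List (String × List (String × String))) (traces : List (List String)) : List (String × List (String × String)) :=
  let selfloopers : PySem.Set String := traces.foldl (fun s trace =>
    (trace.zip trace.tail).foldl (fun s p => if p.1 = p.2 then PySem.Set.add s p.1 else s) s) PySem.Set.empty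
  matrix.map (fun p =>
    if PySem.Set.contains selfloopers p.1 ∧ ¬ (p.1 ∈ ["BEGIN", "END"]) then
      (p.1, pvDictSet p.2 p.1 "JMP")
    else p)

-- ===== PRECONDITION & SPEC =====
-- Pre_ excludes association lists with duplicate keys (outer matrix or inner rows): such values
-- cannot arise from a Python dict, so A as Python is never called on them.
def Pre_finding_self_loops_in_traces (matrix : List (String × List (String × String))) (traces : List (List String)) : Prop :=
  (matrix.map Prod.fst).Nodup ∧ ∀ p ∈ matrix, (p.2.map Prod.fst).Nodup
instance (matrix : List (String × List (String × String))) (traces : List (List String)) : Decidable (Pre_finding_self_loops_in_traces matrix traces) := by unfold Pre_finding_self_loops_in_traces; infer_instance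
def pvWitness_finding_self_loops_in_traces : (List (String × List (String × String))) × List (List String) :=
  ([("BEGIN", [("a", "x")]), ("a", [("a", "y"), ("b", "z")]), ("END", [])], [["a", "a", "b"], ["b"]])

def Spec_finding_self_loops_in_traces (matrix : List (String × List (String × String))) (traces : List (List String)) (out : List (String × List (String × String))) : Prop := out = finding_self_loops_in_traces_alt matrix traces
instance (matrix : List (String × List (String × String))) (traces : List (List String)) (out : List (String × List (String × String))) : Decidable (Spec_finding_self_loops_in_traces matrix traces out) := by unfold Spec_finding_self_loops_in_traces; infer_instance

-- ===== CLAIM (what is proved, stated in full; the proofs are below) =====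
def Claim_equal_finding_self_loops_in_traces : Prop := ∀ (matrix : List (String × List (String × String))) (traces : List (List String)), Dom_finding_self_loops_in_traces matrix traces → Pre_finding_self_loops_in_traces matrix traces → Spec_finding_self_loops_in_traces matrix traces (finding_self_loops_in_traces matrix traces)

-- ===== LEMMAS AND PROOFS =====

-- an adjacent repeat of act in trace t, phrased on the zip (B's shape)
abbrev pvZipRep (t : List String) (act : String) : Prop := ∃ p ∈ t.zip t.tail, p.1 = p.2 ∧ p.1 = act

-- a fold whose step conditionally applies an idempotent f collapses to one application
theorem pv_foldl_step_idem {α β : Type} (f : α → α) (hf : ∀ x, f (f x) = f x)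
    (P : β → Prop) [DecidablePred P] (step : α → β → α)
    (hstep : ∀ x b, step x b = if P b then f x else x)
    (l : List β) (x : α) :
    l.foldl step x = if ∃ i ∈ l, P i then f x else x := by
  have aux : ∀ (l : List β) (x : α), l.foldl step (f x) = f x := by
    intro l
    induction l with
    | nil => intro x; rfl
    | cons a l ih =>
      intro x
      rw [List.foldl_cons, hstep]
      by_cases h : P a
      · rw [if_pos h, hf]; exact ih x
      · rw [if_neg h]; exact ih x
  induction l with
  | nil => simp
  | cons a l ih =>
    rw [List.foldl_cons, hstep]
    by_cases h : P a
    · rw [if_pos h, aux, if_pos ⟨a, List.mem_cons_self, h⟩]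
    · rw [if_neg h, ih]
      by_cases h2 : ∃ i ∈ l, P i
      · obtain ⟨i, hi, hp⟩ := h2
        rw [if_pos ⟨i, hi, hp⟩, if_pos ⟨i, List.mem_cons_of_mem a hi, hp⟩]
      · rw [if_neg h2, if_neg (by rintro ⟨i, hi, hp⟩; rcases List.mem_cons.1 hi with rfl | hi; exacts [h hp, h2 ⟨i, hi, hp⟩])]

theorem pvDictSet_idem (r : List (String × String)) (k v : String) :
    pvDictSet (pvDictSet r k v) k v = pvDictSet r k v := by
  induction r with
  | nil => simp [pvDictSet]
  | cons p r ih =>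
    by_cases h : p.1 = k
    · simp [pvDictSet, h]
    · simp [pvDictSet, h, ih]

theorem pvDictModify_modify (m : List (String × List (String × String))) (k : String) (g g' : _) :
    pvDictModify (pvDictModify m k g) k g' = pvDictModify m k (fun r => g' (g r)) := by
  induction m with
  | nil => rfl
  | cons p m ih =>
    by_cases h : p.1 = k
    · simp [pvDictModify, h]
    · simp [pvDictModify, h, ih]

theorem pvDictModify_eq_map (m : List (String × List (String × String))) (k : String) (g : _)
    (hm : (m.map Prod.fst).Nodup) :
    pvDictModify m k g = m.map (fun p => if p.1 = k then (p.1, g p.2) else p) := by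
  induction m with
  | nil => rfl
  | cons p m ih =>
    simp only [List.map_cons] at hm ⊢
    rw [List.nodup_cons] at hm
    by_cases h : p.1 = k
    · simp only [pvDictModify, if_pos h]
      congr 1
      have : ∀ q ∈ m, (if q.1 = k then (q.1, g q.2) else q) = q := by
        intro q hq
        rw [if_neg]
        intro hk
        exact hm.1 (h ▸ hk ▸ List.mem_map_of_mem hq)
      rw [List.map_congr_left this, List.map_id']
    · simp only [pvDictModify, if_neg h]
      rw [ih hm.2]

-- a fold over keys whose step conditionally marks one entry collapses, for nodup keys, to a map
theorem pv_foldl_modify_eq_map (C : String → Prop) [DecidablePred C]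
    (step : List (String × List (String × String)) → String → List (String × List (String × String)))
    (hstep : ∀ m act, step m act
      = if C act then pvDictModify m act (fun row => pvDictSet row act "JMP") else m)
    (l : List String) (m : List (String × List (String × String))) (hm : (m.map Prod.fst).Nodup) :
    l.foldl step m
      = m.map (fun p => if p.1 ∈ l ∧ C p.1 then (p.1, pvDictSet p.2 p.1 "JMP") else p) := by
  induction l generalizing m with
  | nil =>
    simp only [List.foldl_nil, List.not_mem_nil, false_and, if_false]
    exact (List.map_id' m).symm
  | cons a l ih =>
    have hkeys : ∀ (m : List (String × List (String × String))) (k : String) (g : _),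
        (pvDictModify m k g).map Prod.fst = m.map Prod.fst := by
      intro m k g
      induction m with
      | nil => rfl
      | cons p m ihm =>
        by_cases h : p.1 = k
        · simp [pvDictModify, h]
        · simp [pvDictModify, h, ihm]
    rw [List.foldl_cons, hstep]
    by_cases hC : C a
    · rw [if_pos hC]
      have hm' : ((pvDictModify m a (fun row => pvDictSet row a "JMP")).map Prod.fst).Nodup := by
        rw [hkeys]; exact hm
      rw [ih _ hm', pvDictModify_eq_map m a (fun row => pvDictSet row a "JMP") hm, List.map_map]
      apply List.map_congr_left
      intro p hp
      by_cases h1 : p.1 = a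
      · subst h1
        by_cases h2 : p.1 ∈ l
        · simp [h2, hC, pvDictSet_idem]
        · simp [h2, hC]
      · by_cases h2 : p.1 ∈ l <;> simp [h1, h2, Function.comp]
    · rw [if_neg hC, ih _ hm]
      apply List.map_congr_left
      intro p hp
      by_cases h1 : p.1 = a
      · subst h1; simp [hC]
      · simp [h1]

-- A's (count > 1, index scan) condition is the adjacent-repeat condition
theorem pv_cond_iff (t : List String) (act : String) :
    (PySem.List.count t act > 1 ∧
      ∃ i ∈ PySem.List.pyRange 0 ((t.length : Int) - 1) 1,
        PySem.List.pyGetD t i "" = act ∧ PySem.List.pyGetD t (i + 1) "" = act)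
      ↔ pvZipRep t act := by
  constructor
  · rintro ⟨-, i, hi, h1, h2⟩
    rw [PySem.List.mem_pyRange_one] at hi
    have hj : i.toNat + 1 < t.length := by omega
    have hit : i = (i.toNat : Int) := by omega
    rw [hit, PySem.List.pyGetD_natCast, List.getD_eq_getElem _ _ (by omega)] at h1
    have : i + 1 = ((i.toNat + 1 : Nat) : Int) := by omega
    rw [this, PySem.List.pyGetD_natCast, List.getD_eq_getElem _ _ hj] at h2
    have hz : i.toNat < (t.zip t.tail).length := by
      rw [List.length_zip, List.length_tail]; omega
    refine ⟨(t.zip t.tail)[i.toNat], List.getElem_mem hz, ?_⟩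
    rw [List.getElem_zip, List.getElem_tail]
    exact ⟨by rw [h1, h2], h1⟩
  · rintro ⟨p, hp, heq, hact⟩
    obtain ⟨j, hj, hpj⟩ := List.getElem_of_mem hp
    have hjl : j + 1 < t.length := by
      rw [List.length_zip, List.length_tail] at hj; omega
    rw [List.getElem_zip, List.getElem_tail] at hpj
    have h1 : t[j] = act := by rw [← hact, ← hpj]
    have h2 : t[j + 1] = act := by rw [← hact, heq, ← hpj]
    constructor
    · rw [PySem.List.count_eq]
      have hsub : List.Sublist [act, act] t := by
        have hd1 : t.drop j = t[j] :: t.drop (j + 1) := List.drop_eq_getElem_cons (by omega)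
        have hd2 : t.drop (j + 1) = t[j + 1] :: t.drop (j + 2) := List.drop_eq_getElem_cons hjl
        have : List.Sublist [act, act] (t.drop j) := by
          rw [hd1, hd2, h1, h2]
          exact ((List.nil_sublist _).cons₂ act).cons₂ act
        exact this.trans (List.drop_sublist j t)
      have := hsub.count_le act
      simpa using this
    · refine ⟨(j : Int), ?_, ?_, ?_⟩
      · rw [PySem.List.mem_pyRange_one]; omega
      · rw [PySem.List.pyGetD_natCast, List.getD_eq_getElem _ _ (by omega)]; exact h1
      · have : (j : Int) + 1 = ((j + 1 : Nat) : Int) := by omega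
        rw [this, PySem.List.pyGetD_natCast, List.getD_eq_getElem _ _ hjl]; exact h2

-- membership in B's selflooper set
theorem pv_mem_selfloopers (traces : List (List String)) (s : PySem.Set String) (y : String) :
    y ∈ traces.foldl (fun s trace =>
        (trace.zip trace.tail).foldl (fun s p => if p.1 = p.2 then PySem.Set.add s p.1 else s) s) s
      ↔ y ∈ s ∨ ∃ t ∈ traces, pvZipRep t y := by
  have inner : ∀ (pairs : List (String × String)) (s : PySem.Set String),
      y ∈ pairs.foldl (fun s p => if p.1 = p.2 then PySem.Set.add s p.1 else s) s
        ↔ y ∈ s ∨ ∃ p ∈ pairs, p.1 = p.2 ∧ p.1 = y := by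
    intro pairs
    induction pairs with
    | nil => intro s; simp
    | cons p pairs ih =>
      intro s
      by_cases h : p.1 = p.2
      · simp only [List.foldl_cons, if_pos h, ih, PySem.Set.mem_add, List.mem_cons]
        constructor
        · rintro (⟨hy | hy⟩ | ⟨q, hq, hqe, hqy⟩)
          · exact Or.inl hy
          · exact Or.inr ⟨p, Or.inl rfl, h, hy.symm⟩
          · exact Or.inr ⟨q, Or.inr hq, hqe, hqy⟩
        · rintro (hy | ⟨q, hq | hq, hqe, hqy⟩)
          · exact Or.inl (Or.inl hy)
          · exact Or.inl (Or.inr (hq ▸ hqy).symm)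
          · exact Or.inr ⟨q, hq, hqe, hqy⟩
      · simp only [List.foldl_cons, if_neg h, ih, List.mem_cons]
        constructor
        · rintro (hy | ⟨q, hq, hqe, hqy⟩)
          · exact Or.inl hy
          · exact Or.inr ⟨q, Or.inr hq, hqe, hqy⟩
        · rintro (hy | ⟨q, hq | hq, hqe, hqy⟩)
          · exact Or.inl hy
          · exact absurd (hq ▸ hqe) h
          · exact Or.inr ⟨q, hq, hqe, hqy⟩
  induction traces generalizing s with
  | nil => simp
  | cons t traces ih =>
    simp only [List.foldl_cons, ih, inner, List.mem_cons, pvZipRep]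
    constructor
    · rintro (⟨hy | ⟨p, hp, he, ha⟩⟩ | ⟨u, hu, hz⟩)
      · exact Or.inl hy
      · exact Or.inr ⟨t, Or.inl rfl, p, hp, he, ha⟩
      · exact Or.inr ⟨u, Or.inr hu, hz⟩
    · rintro (hy | ⟨u, hu | hu, hz⟩)
      · exact Or.inl (Or.inl hy)
      · exact Or.inl (Or.inr (hu ▸ hz))
      · exact Or.inr ⟨u, hu, hz⟩

theorem pv_contains_selfloopers (traces : List (List String)) (y : String) :
    PySem.Set.contains (traces.foldl (fun s trace =>
        (trace.zip trace.tail).foldl (fun s p => if p.1 = p.2 then PySem.Set.add s p.1 else s) s)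
      PySem.Set.empty) y = true ↔ ∃ t ∈ traces, pvZipRep t y := by
  have h1 : ∀ (X : PySem.Set String), PySem.Set.contains X y = true ↔ y ∈ X := by
    intro X; simp [PySem.Set.contains]
  rw [h1, pv_mem_selfloopers]
  simp [PySem.Set.empty]

-- A's loop over one act, over all traces, collapses to one conditional mark
theorem pv_traces_fold (act : String) (traces : List (List String))
    (m : List (String × List (String × String))) :
    traces.foldl (fun m trace =>
      let act_counter := PySem.List.count trace act
      if act_counter > 1 then
        (PySem.List.pyRange 0 ((trace.length : Int) - 1) 1).foldl (fun m i =>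
          if PySem.List.pyGetD trace i "" = act ∧ PySem.List.pyGetD trace (i + 1) "" = act then
            pvDictModify m act (fun row => pvDictSet row act "JMP")
          else m) m
      else m) m
    = if ∃ t ∈ traces, pvZipRep t act
        then pvDictModify m act (fun row => pvDictSet row act "JMP") else m := by
  have hf : ∀ x, pvDictModify (pvDictModify x act (fun row => pvDictSet row act "JMP")) act
      (fun row => pvDictSet row act "JMP")
      = pvDictModify x act (fun row => pvDictSet row act "JMP") := by
    intro x
    rw [pvDictModify_modify]
    congr 1
    funext r
    exact pvDictSet_idem r act "JMP"
  apply pv_foldl_step_idem _ hf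
  intro x t
  show (if PySem.List.count t act > 1 then _ else x) = _
  by_cases hcnt : PySem.List.count t act > 1
  · rw [if_pos hcnt,
      pv_foldl_step_idem (fun m => pvDictModify m act (fun row => pvDictSet row act "JMP")) hf
        (fun i => PySem.List.pyGetD t i "" = act ∧ PySem.List.pyGetD t (i + 1) "" = act)
        _ (fun _ _ => rfl) _ x]
    by_cases hz : pvZipRep t act
    · rw [if_pos ((pv_cond_iff t act).2 hz).2, if_pos hz]
    · rw [if_neg (fun hex => hz ((pv_cond_iff t act).1 ⟨hcnt, hex⟩)), if_neg hz]
  · rw [if_neg hcnt, if_neg (fun hz => hcnt ((pv_cond_iff t act).2 hz).1)]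

-- ===== VERDICT (by name: the statement is the Claim_ definition above) =====
theorem finding_self_loops_in_traces_spec : Claim_equal_finding_self_loops_in_traces := by
  intro matrix traces _hdom hpre
  obtain ⟨hm, -⟩ := hpre
  unfold Spec_finding_self_loops_in_traces finding_self_loops_in_traces
  have hstep : ∀ (m : List (String × List (String × String))) (act : String),
      (fun (m : List (String × List (String × String))) (act : String) =>
        if ¬ (act ∈ ["BEGIN", "END"]) then
          traces.foldl (fun m trace =>
            let act_counter := PySem.List.count trace act
            if act_counter > 1 then
              (PySem.List.pyRange 0 ((trace.length : Int) - 1) 1).foldl (fun m i =>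
                if PySem.List.pyGetD trace i "" = act ∧ PySem.List.pyGetD trace (i + 1) "" = act then
                  pvDictModify m act (fun row => pvDictSet row act "JMP")
                else m) m
            else m) m
        else m) m act
      = if (¬ act ∈ (["BEGIN", "END"] : List String) ∧ ∃ t ∈ traces, pvZipRep t act)
          then pvDictModify m act (fun row => pvDictSet row act "JMP") else m := by
    intro m act
    show (if ¬ act ∈ (["BEGIN", "END"] : List String) then _ else m) = _
    by_cases hbe : act ∈ (["BEGIN", "END"] : List String)
    · rw [if_neg (not_not_intro hbe), if_neg (fun h => h.1 hbe)]
    · rw [if_pos hbe, pv_traces_fold]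
      by_cases hz : ∃ t ∈ traces, pvZipRep t act
      · rw [if_pos hz, if_pos ⟨hbe, hz⟩]
      · rw [if_neg hz, if_neg (fun h => hz h.2)]
  rw [pv_foldl_modify_eq_map
    (fun act => ¬ act ∈ (["BEGIN", "END"] : List String) ∧ ∃ t ∈ traces, pvZipRep t act) _
    hstep (matrix.map Prod.fst) matrix hm]
  simp only [finding_self_loops_in_traces_alt]
  apply List.map_congr_left
  intro p hp
  have hmem : p.1 ∈ matrix.map Prod.fst := List.mem_map_of_mem hp
  by_cases hbe : p.1 ∈ (["BEGIN", "END"] : List String)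
  · rw [if_neg (fun h => h.2.1 hbe), if_neg (fun h => h.2 hbe)]
  · by_cases hz : ∃ t ∈ traces, pvZipRep t p.1
    · rw [if_pos ⟨hmem, hbe, hz⟩,
        if_pos ⟨(pv_contains_selfloopers traces p.1).2 hz, hbe⟩]
    · rw [if_neg (fun h => hz h.2.2),
        if_neg (fun h => hz ((pv_contains_selfloopers traces p.1).1 h.1))]
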